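-- pv_equiv track=rewrite | github.com/JisinKeo/Algorithm | Programmers/모의고사.py | solution
-- ===== SOURCE A (Python) =====
-- def solution(answers):
--     answer = []
--
--     one = [1,2,3,4,5]
--     two = [2,1,2,3,2,4,2,5]
--     three = [3,3,1,1,2,2,4,4,5,5]
--
--     one_cnt = 0
--     two_cnt = 0
--     three_cnt = 0
--
--     for i in range(0, len(answers)):
--         if answers[i] == one[i%5]:
--             one_cnt+=1
--
--     for i in range(0, len(answers)):
--         if answers[i] == two[i%8]:
--             two_cnt+=1
--
--     for i in range(0, len(answers)):
--         if answers[i] == three[i%10]: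
--             three_cnt+=1
--
--     temp = max(one_cnt, two_cnt, three_cnt)
--
--     if temp == one_cnt:
--         answer.append(1)
--     if temp == two_cnt:
--         answer.append(2)
--     if temp == three_cnt:
--         answer.append(3)
--
--
--     return answer
-- ===== SOURCE B (Python) =====
-- def solution(answers):
--     # Histogram over (position mod 40, answer); 40 = lcm(5, 8, 10), so each
--     # supervisor's score is a fixed 40-lookup dot product with the histogram.
--     hist = {}
--     for i, a in enumerate(answers):
--         k = (i % 40, a)
--         hist[k] = hist.get(k, 0) + 1
--     patterns = [[1, 2, 3, 4, 5],
--                 [2, 1, 2, 3, 2, 4, 2, 5],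
--                 [3, 3, 1, 1, 2, 2, 4, 4, 5, 5]]
--     scores = [sum(hist.get((r, p[r % len(p)]), 0) for r in range(40))
--               for p in patterns]
--     best = max(scores)
--     return [j + 1 for j, s in enumerate(scores) if s == best]
-- ===== Notes on version B (the rewrite author's own statement) =====
-- stated objective: alternative
-- what changed: Instead of scanning answers once per supervisor against each cyclic key, B builds a single histogram keyed by (index mod 40, answer) (40 = lcm of the pattern lengths) in one pass, then derives each score from 40 histogram lookups and selects the maximal indices with a comprehension.
import Mathlib
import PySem

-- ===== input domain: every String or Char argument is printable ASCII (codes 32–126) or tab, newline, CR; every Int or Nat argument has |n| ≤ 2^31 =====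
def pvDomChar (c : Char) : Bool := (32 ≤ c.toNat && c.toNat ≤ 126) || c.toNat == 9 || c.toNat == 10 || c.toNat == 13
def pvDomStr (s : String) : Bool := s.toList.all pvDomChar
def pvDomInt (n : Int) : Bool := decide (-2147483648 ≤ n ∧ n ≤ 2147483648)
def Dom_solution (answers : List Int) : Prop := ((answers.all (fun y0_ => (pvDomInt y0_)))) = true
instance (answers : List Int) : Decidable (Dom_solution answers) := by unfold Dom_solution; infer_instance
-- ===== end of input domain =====

-- B replaces A's per-supervisor scans with one histogram keyed by (index mod 40, answer)
-- built in a single pass; each score is then 40 histogram lookups (alternative; same cost).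

-- ===== PORT A =====
def solution (answers : List Int) : List Int :=
  let one : List Int := [1, 2, 3, 4, 5]
  let two : List Int := [2, 1, 2, 3, 2, 4, 2, 5]
  let three : List Int := [3, 3, 1, 1, 2, 2, 4, 4, 5, 5]
  let one_cnt : Int := (PySem.List.pyRange 0 (answers.length : Int) 1).foldl
    (fun c i => if PySem.List.pyGetD answers i 0 = PySem.List.pyGetD one (PySem.Int.mod i 5) 0 then c + 1 else c) 0
  let two_cnt : Int := (PySem.List.pyRange 0 (answers.length : Int) 1).foldl
    (fun c i => if PySem.List.pyGetD answers i 0 = PySem.List.pyGetD two (PySem.Int.mod i 8) 0 then c + 1 else c) 0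
  let three_cnt : Int := (PySem.List.pyRange 0 (answers.length : Int) 1).foldl
    (fun c i => if PySem.List.pyGetD answers i 0 = PySem.List.pyGetD three (PySem.Int.mod i 10) 0 then c + 1 else c) 0
  let temp : Int := max (max one_cnt two_cnt) three_cnt
  let answer : List Int := []
  let answer := if temp = one_cnt then answer ++ [1] else answer
  let answer := if temp = two_cnt then answer ++ [2] else answer
  let answer := if temp = three_cnt then answer ++ [3] else answer
  answer

-- ===== PORT B =====
def solution_alt (answers : List Int) : List Int :=
  let hist : PySem.Dict (Int × Int) Int :=
    (PySem.List.enumerate answers 0).foldl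
      (fun d p =>
        d.insert (PySem.Int.mod p.1 40, p.2) (d.getD (PySem.Int.mod p.1 40, p.2) 0 + 1))
      PySem.Dict.empty
  let patterns : List (List Int) :=
    [[1, 2, 3, 4, 5], [2, 1, 2, 3, 2, 4, 2, 5], [3, 3, 1, 1, 2, 2, 4, 4, 5, 5]]
  let scores : List Int := patterns.map (fun p =>
    ((PySem.List.pyRange 0 40 1).map (fun r =>
      hist.getD (r, PySem.List.pyGetD p (PySem.Int.mod r (p.length : Int)) 0) 0)).sum)
  let best : Int := (PySem.List.max? scores (fun y => y)).getD 0  -- max(scores); scores has length 3, never empty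
  (PySem.List.enumerate scores 0).foldl
    (fun acc q => if q.2 = best then acc ++ [q.1 + 1] else acc) []

-- ===== PRECONDITION & SPEC =====
def Spec_solution (answers : List Int) (out : List Int) : Prop := out = solution_alt answers
instance (answers : List Int) (out : List Int) : Decidable (Spec_solution answers out) := by unfold Spec_solution; infer_instance

-- ===== CLAIM (what is proved, stated in full; the proofs are below) =====
def Claim_equal_solution : Prop := ∀ (answers : List Int), Dom_solution answers → Spec_solution answers (solution answers)

-- ===== LEMMAS AND PROOFS =====

-- running match count of xs against pattern pat (cycled with modulus m), starting at index s
def cntFrom (pat : List Int) (m : Int) : Int → List Int → Int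
  | _, [] => 0
  | s, a :: xs =>
    (if a = PySem.List.pyGetD pat (PySem.Int.mod s m) 0 then 1 else 0) + cntFrom pat m (s + 1) xs

theorem enum_fold_cnt (pat : List Int) (m : Int) (xs : List Int) : ∀ (s c : Int),
    (PySem.List.enumerate xs s).foldl
      (fun c p => if p.2 = PySem.List.pyGetD pat (PySem.Int.mod p.1 m) 0 then c + 1 else c) c
    = c + cntFrom pat m s xs := by
  induction xs with
  | nil => intro s c; simp [PySem.List.enumerate_nil, cntFrom]
  | cons a t ih =>
    intro s c
    rw [PySem.List.enumerate_cons]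
    simp only [List.foldl_cons, ih, cntFrom]
    split <;> omega

theorem a_cnt (pat : List Int) (m : Int) (xs : List Int) :
    (PySem.List.pyRange 0 (xs.length : Int) 1).foldl
      (fun c i => if PySem.List.pyGetD xs i 0 = PySem.List.pyGetD pat (PySem.Int.mod i m) 0 then c + 1 else c) 0
    = cntFrom pat m 0 xs := by
  have he := PySem.List.enumerate_eq_map_pyRange xs 0
  have h := enum_fold_cnt pat m xs 0 0
  rw [he] at h
  rw [List.foldl_map] at h
  simpa using h

-- a sum over a duplicate-free list whose function vanishes off r0 collapses to f r0
theorem sum_zero (t : List Int) (f : Int → Int) (h : ∀ r ∈ t, f r = 0) : (t.map f).sum = 0 := by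
  induction t with
  | nil => simp
  | cons c u ih =>
    simp only [List.map_cons, List.sum_cons]
    rw [h c List.mem_cons_self, ih (fun r hr => h r (List.mem_cons_of_mem _ hr))]
    simp

theorem sum_single (L : List Int) (hnd : L.Nodup) (r0 : Int) (h0 : r0 ∈ L)
    (f : Int → Int) (hf : ∀ r ∈ L, r ≠ r0 → f r = 0) : (L.map f).sum = f r0 := by
  induction L with
  | nil => cases h0
  | cons b t ih =>
    simp only [List.map_cons, List.sum_cons]
    rcases List.mem_cons.mp h0 with rfl | hmem
    · rw [sum_zero t f (fun r hr => hf r (List.mem_cons_of_mem _ hr)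
        (fun h => (List.nodup_cons.mp hnd).1 (h ▸ hr)))]
      simp
    · rw [hf b List.mem_cons_self (fun h => (List.nodup_cons.mp hnd).1 (h ▸ hmem)),
        ih (List.nodup_cons.mp hnd).2 hmem
          (fun r hr hne => hf r (List.mem_cons_of_mem _ hr) hne)]
      simp

-- the histogram sum over residues 0..39 equals the direct cyclic match count
theorem hist_sum (pat : List Int) (m : Int) (hm : 0 < m) (hdvd : m ∣ 40) (xs : List Int) :
    ∀ (s : Int), 0 ≤ s →
    ((PySem.List.pyRange 0 40 1).map (fun r =>
        ((((PySem.List.enumerate xs s).map (fun p => (PySem.Int.mod p.1 40, p.2))).count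
            (r, PySem.List.pyGetD pat (PySem.Int.mod r m) 0) : Nat) : Int))).sum
    = cntFrom pat m s xs := by
  induction xs with
  | nil =>
    intro s _
    simp [PySem.List.enumerate_nil, cntFrom]
  | cons a t ih =>
    intro s hs
    rw [PySem.List.enumerate_cons]
    simp only [List.map_cons, List.count_cons]
    have hsplit :
        ((PySem.List.pyRange 0 40 1).map (fun r =>
          ((((PySem.List.enumerate t (s + 1)).map (fun p => (PySem.Int.mod p.1 40, p.2))).count
              (r, PySem.List.pyGetD pat (PySem.Int.mod r m) 0)
            + if (PySem.Int.mod s 40, a) == (r, PySem.List.pyGetD pat (PySem.Int.mod r m) 0) then 1 else 0 : Nat) : Int))).sum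
        = ((PySem.List.pyRange 0 40 1).map (fun r =>
            ((((PySem.List.enumerate t (s + 1)).map (fun p => (PySem.Int.mod p.1 40, p.2))).count
                (r, PySem.List.pyGetD pat (PySem.Int.mod r m) 0) : Nat) : Int))).sum
          + ((PySem.List.pyRange 0 40 1).map (fun r =>
              ((if (PySem.Int.mod s 40, a) == (r, PySem.List.pyGetD pat (PySem.Int.mod r m) 0) then 1 else 0 : Nat) : Int))).sum := by
      push_cast
      rw [← PySem.List.sum_map_add_int]
    rw [hsplit, ih (s + 1) (by omega)]
    have hr0mem : PySem.Int.mod s 40 ∈ PySem.List.pyRange 0 40 1 := by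
      rw [PySem.List.mem_pyRange_one]
      have := PySem.Int.mod_nonneg s (b := 40) (by norm_num)
      have := PySem.Int.mod_lt s (b := 40) (by norm_num)
      omega
    have hnd : (PySem.List.pyRange 0 40 1).Nodup := by decide
    have hind : ((PySem.List.pyRange 0 40 1).map (fun r =>
        ((if (PySem.Int.mod s 40, a) == (r, PySem.List.pyGetD pat (PySem.Int.mod r m) 0) then 1 else 0 : Nat) : Int))).sum
        = if a = PySem.List.pyGetD pat (PySem.Int.mod s m) 0 then 1 else 0 := by
      rw [sum_single _ hnd (PySem.Int.mod s 40) hr0mem]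
      · have hmm : PySem.Int.mod (PySem.Int.mod s 40) m = PySem.Int.mod s m := by
          rw [PySem.Int.mod_eq_emod_of_pos (by norm_num : (0:Int) < 40),
              PySem.Int.mod_eq_emod_of_pos hm, PySem.Int.mod_eq_emod_of_pos hm,
              Int.emod_emod_of_dvd s hdvd]
        rw [hmm]
        by_cases h : a = PySem.List.pyGetD pat (PySem.Int.mod s m) 0
        · simp [h]
        · simp [h]
      · intro r _ hne
        simp only [Prod.mk.injEq, beq_iff_eq]
        rw [if_neg, Nat.cast_zero]
        rintro ⟨h1, -⟩
        exact hne h1.symm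
    rw [hind]
    simp only [cntFrom]
    omega

-- B's histogram lookup is a count over the (index mod 40, answer) key list
theorem hist_getD (xs : List Int) (k : Int × Int) :
    ((PySem.List.enumerate xs 0).foldl
      (fun d p =>
        d.insert (PySem.Int.mod p.1 40, p.2) (d.getD (PySem.Int.mod p.1 40, p.2) 0 + 1))
      (PySem.Dict.empty : PySem.Dict (Int × Int) Int)).getD k 0
    = (((PySem.List.enumerate xs 0).map (fun p => (PySem.Int.mod p.1 40, p.2))).count k : Int) := by
  have h := List.foldl_map (f := fun p : Int × Int => (PySem.Int.mod p.1 40, p.2))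
    (g := fun (d : PySem.Dict (Int × Int) Int) kk => d.insert kk (d.getD kk 0 + 1))
    (l := PySem.List.enumerate xs 0) (init := PySem.Dict.empty)
  rw [← h]
  rw [PySem.Dict.getD_foldl_insert_add_one]
  simp [PySem.Dict.getD_empty]

-- the two tail computations (append chain vs enumerate fold over the score list) agree
theorem tail_eq (c1 c2 c3 : Int) :
    (let temp : Int := max (max c1 c2) c3
     let answer : List Int := []
     let answer := if temp = c1 then answer ++ [1] else answer
     let answer := if temp = c2 then answer ++ [2] else answer
     let answer := if temp = c3 then answer ++ [3] else answer
     answer)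
    = (let scores : List Int := [c1, c2, c3]
       let best : Int := (PySem.List.max? scores (fun y => y)).getD 0
       (PySem.List.enumerate scores 0).foldl
         (fun acc q => if q.2 = best then acc ++ [q.1 + 1] else acc) []) := by
  simp only [PySem.List.enumerate_cons, PySem.List.enumerate_nil, List.foldl_cons, List.foldl_nil,
    PySem.List.max?_id_cons, Option.getD_some]
  norm_num
  split_ifs <;> first | rfl | (exfalso; omega)

-- ===== VERDICT (by name: the statement is the Claim_ definition above) =====
theorem solution_spec : Claim_equal_solution := by
  intro answers _
  unfold Spec_solution solution solution_alt
  simp only [a_cnt, List.map_cons, List.map_nil, hist_getD]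
  rw [show (([1,2,3,4,5] : List Int).length : Int) = 5 from rfl,
      show (([2,1,2,3,2,4,2,5] : List Int).length : Int) = 8 from rfl,
      show (([3,3,1,1,2,2,4,4,5,5] : List Int).length : Int) = 10 from rfl,
      hist_sum [1,2,3,4,5] 5 (by norm_num) (by norm_num) answers 0 le_rfl,
      hist_sum [2,1,2,3,2,4,2,5] 8 (by norm_num) (by norm_num) answers 0 le_rfl,
      hist_sum [3,3,1,1,2,2,4,4,5,5] 10 (by norm_num) (by norm_num) answers 0 le_rfl]
  exact tail_eq _ _ _
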